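-- pv_equiv track=rewrite | github.com/Project4today/eng4todaycore | api/report.py | calculate_spans
-- ===== SOURCE A (Python) =====
-- def calculate_spans(data_list, column_name):
--     """Tính toán rowspan cho cột."""
--     spans = []
--     i = 0
--     while i < len(data_list):
--         val = data_list[i][column_name]
--         count = 1
--         for j in range(i + 1, len(data_list)):
--             if data_list[j][column_name] == val and val not in ["", "-"]:
--                 count += 1
--             else:
--                 break
--         for k in range(count):
--             spans.append(count if k == 0 else 0)
--         i += count
--     return spans
-- ===== SOURCE B (Python) =====
-- def calculate_spans(data_list, column_name):
--     """Tính toán rowspan cho cột."""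
--     spans = []
--     start = None
--     prev = None
--     for row in data_list:
--         val = row[column_name]
--         if start is not None and val == prev and val not in ("", "-"):
--             spans[start] += 1
--             spans.append(0)
--         else:
--             start = len(spans)
--             spans.append(1)
--             prev = val
--     return spans
-- ===== Notes on version B (the rewrite author's own statement) =====
-- stated objective: simpler
-- what changed: Replaces the nested while/for run-counting with a single forward pass that back-patches the span count at the head index of the current run.
import Mathlib
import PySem

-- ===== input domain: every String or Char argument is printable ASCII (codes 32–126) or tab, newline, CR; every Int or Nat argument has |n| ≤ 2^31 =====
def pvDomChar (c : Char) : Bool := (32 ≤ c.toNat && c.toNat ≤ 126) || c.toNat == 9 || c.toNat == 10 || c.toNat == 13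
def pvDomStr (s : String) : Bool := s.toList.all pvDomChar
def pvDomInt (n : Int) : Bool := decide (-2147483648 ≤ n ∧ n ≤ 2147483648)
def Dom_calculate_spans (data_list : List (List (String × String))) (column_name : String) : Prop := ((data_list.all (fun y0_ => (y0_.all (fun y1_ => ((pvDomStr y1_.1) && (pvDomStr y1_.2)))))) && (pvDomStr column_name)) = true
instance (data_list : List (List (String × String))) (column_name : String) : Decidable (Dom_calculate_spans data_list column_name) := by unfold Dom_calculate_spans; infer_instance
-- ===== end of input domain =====

-- B replaces A's nested run-counting loops by a single forward pass that back-patches the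
-- span count at the head of the current run (objective: simpler; same O(n) cost).

-- shared helper: Python's row[column_name]; Pre_ guarantees the key is present, so getD "" is never taken
def pvLookup (row : List (String × String)) (col : String) : String :=
  ((PySem.Dict.mk row).get? col).getD ""

-- val not in ["", "-"]
def pvMergeable (v : String) : Bool := !(v == "" || v == "-")

-- ===== PORT A =====
-- A's inner `for j` loop: how many following rows continue the run (it breaks at the first mismatch)
def pvInnerA (col val : String) : List (List (String × String)) → Nat
  | [] => 0
  | row :: rest =>
      if pvLookup row col == val && pvMergeable val then 1 + pvInnerA col val rest else 0

-- A's outer `while i < len(data_list)` loop, on the suffix starting at i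
def pvOuterA (col : String) : List (List (String × String)) → List Int
  | [] => []
  | row :: rest =>
      let val := pvLookup row col
      let count := 1 + pvInnerA col val rest
      ((List.range count).map (fun k => if k = 0 then (count : Int) else 0))
        ++ pvOuterA col (rest.drop (pvInnerA col val rest))
termination_by l => l.length
decreasing_by simp [List.length_drop]

def calculate_spans (data_list : List (List (String × String))) (column_name : String) : List Int :=
  pvOuterA column_name data_list

-- ===== PORT B =====
-- one step of B's forward pass; state = (spans, start, prev)
def pvStepB (col : String) (st : List Int × Option Nat × String) (row : List (String × String)) :
    List Int × Option Nat × String :=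
  let val := pvLookup row col
  match st with
  | (spans, some s, prev) =>
      if val == prev && pvMergeable val then (spans.modify s (· + 1) ++ [0], some s, prev)
      else (spans ++ [1], some spans.length, val)
  | (spans, none, _) => (spans ++ [1], some spans.length, val)

def calculate_spans_alt (data_list : List (List (String × String))) (column_name : String) : List Int :=
  (data_list.foldl (pvStepB column_name) ([], none, "")).1

-- ===== PRECONDITION & SPEC =====
-- Pre_ excludes exactly the inputs where Python A raises KeyError: a row lacking column_name.
def Pre_calculate_spans (data_list : List (List (String × String))) (column_name : String) : Prop :=
  ∀ row ∈ data_list, (PySem.Dict.mk row).contains column_name = true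
instance (data_list : List (List (String × String))) (column_name : String) : Decidable (Pre_calculate_spans data_list column_name) := by unfold Pre_calculate_spans; infer_instance

def pvWitness_calculate_spans : (List (List (String × String))) × String :=
  ([[("a", "x")], [("a", "x")], [("a", "y")]], "a")

def Spec_calculate_spans (data_list : List (List (String × String))) (column_name : String) (out : List Int) : Prop := out = calculate_spans_alt data_list column_name
instance (data_list : List (List (String × String))) (column_name : String) (out : List Int) : Decidable (Spec_calculate_spans data_list column_name out) := by unfold Spec_calculate_spans; infer_instance

-- ===== CLAIM (what is proved, stated in full; the proofs are below) =====
def Claim_equal_calculate_spans : Prop := ∀ (data_list : List (List (String × String))) (column_name : String), Dom_calculate_spans data_list column_name → Pre_calculate_spans data_list column_name → Spec_calculate_spans data_list column_name (calculate_spans data_list column_name)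


-- ===== LEMMAS AND PROOFS =====

-- the block of spans A emits for a run of length c (c ≥ 1): [c, 0, …, 0]
def pvRun (c : Nat) : List Int := (c : Int) :: List.replicate (c - 1) 0

lemma pvOuterA_nil (col : String) : pvOuterA col [] = [] := by
  rw [pvOuterA.eq_def]

lemma pvOuterA_cons (col : String) (row : List (String × String))
    (rest : List (List (String × String))) :
    pvOuterA col (row :: rest) =
      ((List.range (1 + pvInnerA col (pvLookup row col) rest)).map
          (fun k => if k = 0 then ((1 + pvInnerA col (pvLookup row col) rest : Nat) : Int) else 0))
        ++ pvOuterA col (rest.drop (pvInnerA col (pvLookup row col) rest)) := by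
  rw [pvOuterA.eq_def]

lemma pvRun_range (c : Nat) (hc : 1 ≤ c) :
    (List.range c).map (fun k => if k = 0 then (c : Int) else 0) = pvRun c := by
  obtain ⟨n, rfl⟩ : ∃ n, c = n + 1 := ⟨c - 1, by omega⟩
  rw [List.range_succ_eq_map, List.map_cons, List.map_map, pvRun]
  simp [Function.comp_def, List.map_const']

lemma pvModify_append (l1 : List Int) (x : Int) (l2 : List Int) (f : Int → Int) :
    (l1 ++ x :: l2).modify l1.length f = l1 ++ f x :: l2 := by
  induction l1 with
  | nil => simp [List.modify]
  | cons a t ih => simpa [List.modify] using ih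

lemma pvCond_eq (val v : String) :
    (val == v && pvMergeable val) = (val == v && pvMergeable v) := by
  by_cases h : val = v
  · subst h; rfl
  · rw [beq_eq_false_iff_ne.mpr h, Bool.false_and, Bool.false_and]

lemma pvStepB_merge (col : String) (row : List (String × String)) (spans : List Int) (s : Nat)
    (prev : String) (h : (pvLookup row col == prev && pvMergeable (pvLookup row col)) = true) :
    pvStepB col (spans, some s, prev) row = (spans.modify s (· + 1) ++ [0], some s, prev) := by
  simp [pvStepB, h]

lemma pvStepB_new (col : String) (row : List (String × String)) (spans : List Int) (s : Nat)
    (prev : String) (h : (pvLookup row col == prev && pvMergeable (pvLookup row col)) = false) :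
    pvStepB col (spans, some s, prev) row = (spans ++ [1], some spans.length, pvLookup row col) := by
  simp [pvStepB, h]

lemma pvRun_patch (spans : List Int) (c : Nat) (hc : 1 ≤ c) :
    (spans ++ pvRun c).modify spans.length (· + 1) ++ [0] = spans ++ pvRun (c + 1) := by
  rw [pvRun, pvModify_append, pvRun]
  have h1 : ((c : Int) + 1) = ((c + 1 : Nat) : Int) := by push_cast; ring
  have h2 : List.replicate (c - 1) (0 : Int) ++ [0] = List.replicate (c + 1 - 1) 0 := by
    rw [← List.replicate_succ']
    congr 1
    omega
  rw [List.append_assoc, List.cons_append, h2, h1]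

lemma pvFoldl_run (col : String) :
    ∀ (rest : List (List (String × String))) (spans : List Int) (c : Nat) (v : String), 1 ≤ c →
      (rest.foldl (pvStepB col) (spans ++ pvRun c, some spans.length, v)).1
        = spans ++ pvRun (c + pvInnerA col v rest)
            ++ pvOuterA col (rest.drop (pvInnerA col v rest)) := by
  intro rest
  induction rest with
  | nil =>
      intro spans c v hc
      simp [pvInnerA, pvOuterA_nil]
  | cons row rest ih =>
      intro spans c v hc
      cases h : (pvLookup row col == v && pvMergeable (pvLookup row col)) with
      | true =>
        -- the row continues the run: back-patch the head and append 0
        have hv : pvLookup row col = v := by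
          have := (Bool.and_eq_true _ _).mp h
          exact eq_of_beq this.1
        have hm : pvMergeable v = true := by
          have := (Bool.and_eq_true _ _).mp h
          simpa [hv] using this.2
        have hinner : pvInnerA col v (row :: rest) = 1 + pvInnerA col v rest := by
          simp [pvInnerA, hv, hm]
        rw [List.foldl_cons, pvStepB_merge col row _ _ _ h, pvRun_patch spans c hc,
          ih spans (c + 1) v (by omega), hinner]
        rw [show (1 + pvInnerA col v rest) = (pvInnerA col v rest) + 1 from by omega,
          List.drop_succ_cons]
        rw [show c + 1 + pvInnerA col v rest = c + (pvInnerA col v rest + 1) from by omega]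
      | false =>
        -- the row starts a new run
        have hcond : (pvLookup row col == v && pvMergeable v) = false := by
          rw [← pvCond_eq]
          exact h
        have hinner : pvInnerA col v (row :: rest) = 0 := by
          simp only [pvInnerA, hcond]
          rfl
        have hone : (spans ++ pvRun c) ++ [1] = (spans ++ pvRun c) ++ pvRun 1 := by
          simp [pvRun]
        rw [List.foldl_cons, pvStepB_new col row _ _ _ h, hone,
          ih (spans ++ pvRun c) 1 (pvLookup row col) (by omega), hinner]
        rw [List.drop_zero, pvOuterA_cons, pvRun_range _ (by omega)]
        simp

lemma pvAlt_eq_outer (col : String) (dl : List (List (String × String))) :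
    calculate_spans_alt dl col = pvOuterA col dl := by
  cases dl with
  | nil => rw [pvOuterA_nil]; rfl
  | cons row rest =>
      have hstep : pvStepB col ([], none, "") row
          = (([] : List Int) ++ pvRun 1, some ([] : List Int).length, pvLookup row col) := by
        simp [pvStepB, pvRun]
      unfold calculate_spans_alt
      rw [List.foldl_cons, hstep,
        pvFoldl_run col rest [] 1 (pvLookup row col) (by omega)]
      rw [pvOuterA_cons, pvRun_range _ (by omega)]
      simp

-- ===== VERDICT (by name: the statement is the Claim_ definition above) =====
theorem calculate_spans_spec : Claim_equal_calculate_spans := by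
  intro dl col _ _
  unfold Spec_calculate_spans calculate_spans
  rw [pvAlt_eq_outer]
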